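-- pv_equiv track=rewrite | github.com/Hyes-y/algorithm | 연습2.py | solution
-- ===== SOURCE A (Python) =====
-- def partial(n):
--     return n*(1 + n) // 2
--
-- def dummy(n, arr):
--     loc = []
--     cnt = 0
--     serial = False
--     for el in arr:
--         if el >= n and serial:
--             cnt += 1
--         elif el < n and serial:
--             loc.append(cnt)
--             cnt = 0
--             serial = False
--         elif el >= n and not serial:
--             cnt += 1
--             serial = True
--     loc.append(cnt)
--
--     return loc
--
-- def solution(H):
--     rectangle_cnt = {x:0 for x in set(H)}
--
--     for h in sorted(rectangle_cnt.keys(), reverse=True):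
--         a = dummy(h, H)
--         b = dummy(h+1, H)
--         if len(a) == 0:
--             continue
--         else:
--             for i in a:
--                 rectangle_cnt[h] += partial(i)
--
--             if len(b) == 0:
--                 continue
--             else:
--                 for j in b:
--                     rectangle_cnt[h] -= partial(j)
--
--
--     answer = [[key, value] for key, value in sorted(rectangle_cnt.items(), key=lambda x:x[0])]
--
--     return answer
-- ===== SOURCE B (Python) =====
-- def solution(H):
--     # One pass over suffixes collecting every subarray's minimum (running min),
--     # then a single counting dict; no per-height rescans of H.
--     mins = []
--     suffix = H
--     while suffix:
--         m = suffix[0]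
--         mins.append(m)
--         for x in suffix[1:]:
--             if x < m:
--                 m = x
--             mins.append(m)
--         suffix = suffix[1:]
--     cnt = {}
--     for m in mins:
--         cnt[m] = cnt.get(m, 0) + 1
--     return [[k, cnt[k]] for k in sorted(cnt)]
-- ===== Notes on version B (the rewrite author's own statement) =====
-- stated objective: alternative
-- what changed: Instead of A's per-distinct-height double rescans of H (run-length lists via dummy(h) and dummy(h+1) with triangular-number sums per height), B makes one pass over suffixes collecting every subarray's running minimum and counts them in a single dict.
import Mathlib
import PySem

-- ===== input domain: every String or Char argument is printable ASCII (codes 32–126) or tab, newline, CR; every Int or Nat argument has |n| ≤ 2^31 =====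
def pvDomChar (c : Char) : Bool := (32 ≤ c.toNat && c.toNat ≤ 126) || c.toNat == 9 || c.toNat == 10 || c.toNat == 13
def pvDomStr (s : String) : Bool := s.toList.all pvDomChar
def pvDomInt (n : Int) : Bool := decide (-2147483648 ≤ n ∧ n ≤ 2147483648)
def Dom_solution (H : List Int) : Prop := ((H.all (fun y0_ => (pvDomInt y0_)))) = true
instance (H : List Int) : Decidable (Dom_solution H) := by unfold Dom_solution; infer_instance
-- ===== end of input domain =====

-- B replaces A's per-distinct-height double rescans of H with one pass over
-- suffixes collecting every subarray's running minimum, counted in one dict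
-- (objective: alternative algorithm of similar cost).

-- ===== PORT A =====
def partialA (n : Int) : Int := PySem.Int.floordiv (n * (1 + n)) 2

def dummyGo (n : Int) : List Int → List Int → Int → Bool → List Int
  | [], loc, cnt, _ => loc ++ [cnt]
  | el :: t, loc, cnt, serial =>
    if n ≤ el ∧ serial = true then dummyGo n t loc (cnt + 1) serial
    else if el < n ∧ serial = true then dummyGo n t (loc ++ [cnt]) 0 false
    else if n ≤ el ∧ serial = false then dummyGo n t loc (cnt + 1) true
    else dummyGo n t loc cnt serial

def dummy (n : Int) (arr : List Int) : List Int := dummyGo n arr [] 0 false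

def stepA (H : List Int) (d : PySem.Dict Int Int) (h : Int) : PySem.Dict Int Int :=
  let a := dummy h H
  let b := dummy (h + 1) H
  if a.length = 0 then d
  else
    let d1 := a.foldl (fun d i => d.insert h (d.getD h 0 + partialA i)) d
    if b.length = 0 then d1
    else b.foldl (fun d j => d.insert h (d.getD h 0 - partialA j)) d1

def solution (H : List Int) : List (List Int) :=
  let d0 : PySem.Dict Int Int :=
    (PySem.Set.ofList H).foldl (fun d x => d.insert x 0) PySem.Dict.empty
  let d := (PySem.List.sorted d0.keys (fun x => x) true).foldl (stepA H) d0
  (PySem.List.sorted d.items (fun x => x.1) false).map (fun p => [p.1, p.2])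

-- ===== PORT B =====
-- running minima of the tail of a suffix, seeded with the suffix head m
def runMins (m : Int) : List Int → List Int
  | [] => []
  | x :: t =>
    let m' := if x < m then x else m
    m' :: runMins m' t

-- all subarray minima: for each suffix, its head followed by the running minima
def allMins : List Int → List Int
  | [] => []
  | a :: t => (a :: runMins a t) ++ allMins t

def solution_alt (H : List Int) : List (List Int) :=
  let mins := allMins H
  let cnt : PySem.Dict Int Int :=
    mins.foldl (fun d x => d.insert x (d.getD x 0 + 1)) PySem.Dict.empty
  (PySem.List.sorted cnt.keys (fun x => x) false).map (fun k => [k, cnt.getD k 0])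

-- ===== PRECONDITION & SPEC =====
def Spec_solution (H : List Int) (out : List (List Int)) : Prop := out = solution_alt H
instance (H : List Int) (out : List (List Int)) : Decidable (Spec_solution H out) := by unfold Spec_solution; infer_instance

-- ===== CLAIM (what is proved, stated in full; the proofs are below) =====
def Claim_equal_solution : Prop := ∀ (H : List Int), Dom_solution H → Spec_solution H (solution H)

-- ===== LEMMAS AND PROOFS =====

theorem runMins_le {n : Int} {m : Int} {t : List Int} (hx : n ∈ runMins m t) : n ≤ m := by
  induction t generalizing m with
  | nil => simp [runMins] at hx
  | cons x t ih =>
    simp only [runMins, List.mem_cons] at hx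
    rcases hx with h | h
    · subst h; split <;> omega
    · have := ih h
      split at this <;> omega

theorem mem_runMins {n m : Int} {t : List Int} (hx : n ∈ runMins m t) : n = m ∨ n ∈ t := by
  induction t generalizing m with
  | nil => simp [runMins] at hx
  | cons x t ih =>
    simp only [runMins, List.mem_cons] at hx
    rcases hx with h | h
    · subst h; split
      · right; simp
      · left; rfl
    · rcases ih h with h | h
      · split at h
        · right; simp [h]
        · left; exact h
      · right; simp [h]

theorem mem_allMins {n : Int} {H : List Int} : n ∈ allMins H ↔ n ∈ H := by
  induction H with
  | nil => simp [allMins]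
  | cons a t ih =>
    simp only [allMins, List.mem_append, List.mem_cons, ih]
    constructor
    · rintro ((h | h) | h)
      · exact Or.inl h
      · rcases mem_runMins h with h | h
        · exact Or.inl h
        · exact Or.inr h
      · exact Or.inr h
    · rintro (h | h)
      · exact Or.inl (Or.inl h)
      · exact Or.inr h

theorem countP_runMins_lt {n m : Int} (t : List Int) (hm : m < n) :
    (runMins m t).countP (fun x => decide (n ≤ x)) = 0 := by
  rw [List.countP_eq_zero]
  intro x hx
  have := runMins_le hx
  simp; omega

theorem countP_runMins {n m : Int} (t : List Int) (hm : n ≤ m) :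
    (runMins m t).countP (fun x => decide (n ≤ x)) =
      (t.takeWhile (fun x => decide (n ≤ x))).length := by
  induction t generalizing m with
  | nil => simp [runMins]
  | cons x t ih =>
    by_cases hx : n ≤ x
    · have hm' : n ≤ (if x < m then x else m) := by split <;> omega
      simp only [runMins, List.countP_cons, List.takeWhile_cons]
      rw [ih hm']
      simp [hx, hm']
    · have hxm : x < m := by omega
      simp only [runMins, List.countP_cons, List.takeWhile_cons, if_pos hxm]
      rw [countP_runMins_lt t (show x < n by omega)]
      simp [hx]

theorem countP_allMins (n : Int) (a : Int) (t : List Int) :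
    (allMins (a :: t)).countP (fun x => decide (n ≤ x)) =
      ((a :: t).takeWhile (fun x => decide (n ≤ x))).length
        + (allMins t).countP (fun x => decide (n ≤ x)) := by
  simp only [allMins, List.countP_append, List.countP_cons, List.takeWhile_cons]
  by_cases ha : n ≤ a
  · rw [countP_runMins t ha]; simp [ha]
  · rw [countP_runMins_lt t (by omega)]; simp [ha]

theorem partialA_zero : partialA 0 = 0 := by decide

theorem partialA_succ (c : Int) (_hc : 0 ≤ c) : partialA (c + 1) = partialA c + (c + 1) := by
  unfold partialA
  rw [PySem.Int.floordiv_eq_ediv_of_pos (by norm_num),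
      PySem.Int.floordiv_eq_ediv_of_pos (by norm_num)]
  obtain ⟨k, hk⟩ : Even (c * (c + 1)) := Int.even_mul_succ_self c
  have h1 : c * (1 + c) = k + k := by rw [← hk]; ring
  have h2 : (c + 1) * (1 + (c + 1)) = (k + k) + 2 * (c + 1) := by rw [← h1]; ring
  rw [h1, h2]
  omega

def sumP (l : List Int) : Int := (l.map partialA).sum

theorem sumP_append_singleton (l : List Int) (c : Int) :
    sumP (l ++ [c]) = sumP l + partialA c := by
  simp [sumP]

theorem sumP_dummyGo (n : Int) (arr : List Int) :
    ∀ (loc : List Int) (cnt : Int), 0 ≤ cnt →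
      sumP (dummyGo n arr loc cnt (decide (0 < cnt))) =
        sumP loc + partialA cnt
          + cnt * ((arr.takeWhile (fun x => decide (n ≤ x))).length : Int)
          + ((allMins arr).countP (fun x => decide (n ≤ x)) : Int) := by
  induction arr with
  | nil =>
    intro loc cnt hc
    simp [dummyGo, sumP_append_singleton, allMins]
  | cons el t ih =>
    intro loc cnt hc
    by_cases hel : n ≤ el
    · by_cases hcnt : 0 < cnt
      · have hser : (decide (0 < cnt)) = true := by simp [hcnt]
        rw [dummyGo, if_pos ⟨hel, hser⟩]
        have h1 : (decide (0 < cnt)) = (decide (0 < cnt + 1)) := by simp [hcnt]; omega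
        rw [h1, ih loc (cnt + 1) (by omega)]
        rw [countP_allMins]
        simp only [List.takeWhile_cons, hel]
        simp only [decide_true, if_pos, List.length_cons]
        push_cast
        have := partialA_succ cnt hc
        set r : Int := ((t.takeWhile (fun x => decide (n ≤ x))).length : Int)
        have hr : cnt * (r + 1) = cnt + cnt * r := by ring
        have hr2 : (cnt + 1) * r = cnt * r + r := by ring
        linarith
      · have hc0 : cnt = 0 := by omega
        subst hc0
        have hser : (decide ((0:Int) < 0)) = false := by decide
        rw [dummyGo]
        rw [if_neg (by simp), if_neg (by simp), if_pos ⟨hel, by simp⟩]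
        have h1 : (true : Bool) = (decide ((0:Int) < 0 + 1)) := by decide
        rw [h1, ih loc (0 + 1) (by omega)]
        rw [countP_allMins]
        simp only [List.takeWhile_cons, hel]
        simp only [decide_true, if_pos, List.length_cons]
        push_cast
        have h2 := partialA_succ 0 (by omega)
        norm_num at h2
        rw [partialA_zero] at h2 ⊢
        set r : Int := ((t.takeWhile (fun x => decide (n ≤ x))).length : Int)
        linarith
    · by_cases hcnt : 0 < cnt
      · have hser : (decide (0 < cnt)) = true := by simp [hcnt]
        rw [dummyGo, if_neg (by simp; omega), if_pos ⟨by omega, hser⟩]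
        have h1 : (false : Bool) = (decide ((0:Int) < 0)) := by decide
        rw [h1, ih (loc ++ [cnt]) 0 (by omega)]
        rw [countP_allMins]
        simp only [List.takeWhile_cons]
        simp only [hel, decide_false, Bool.false_eq_true, ite_false,
          sumP_append_singleton, partialA_zero, List.length_nil]
        push_cast
        ring
      · have hc0 : cnt = 0 := by omega
        subst hc0
        rw [dummyGo]
        rw [if_neg (by simp), if_neg (by simp), if_neg (by simp; omega)]
        rw [ih loc 0 (by omega)]
        rw [countP_allMins]
        simp only [List.takeWhile_cons]
        simp only [hel, decide_false, Bool.false_eq_true, ite_false, List.length_nil]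
        push_cast
        ring

theorem sumP_dummy (n : Int) (H : List Int) :
    sumP (dummy n H) = ((allMins H).countP (fun x => decide (n ≤ x)) : Int) := by
  have h := sumP_dummyGo n H [] 0 (by omega)
  simp only [dummy]
  have h0 : (decide ((0:Int) < 0)) = false := by decide
  rw [h0] at h
  rw [h]
  simp [sumP, partialA_zero]

theorem countP_split_nat (l : List Int) (k : Int) :
    l.countP (fun x => decide (k ≤ x)) =
      l.countP (fun x => decide (k + 1 ≤ x)) + l.count k := by
  induction l with
  | nil => simp
  | cons a t ih =>
    simp only [List.countP_cons, List.count_cons, beq_iff_eq, ih, decide_eq_true_eq]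
    split_ifs <;> omega

theorem countP_sub_count (l : List Int) (k : Int) :
    (l.countP (fun x => decide (k ≤ x)) : Int)
      - (l.countP (fun x => decide (k + 1 ≤ x)) : Int) = l.count k := by
  have := countP_split_nat l k
  push_cast [this]
  ring

theorem sum_map_neg_partialA (l : List Int) :
    (l.map (fun j => -partialA j)).sum = -sumP l := by
  induction l with
  | nil => simp [sumP]
  | cons a t ih =>
    simp only [List.map_cons, List.sum_cons, ih, sumP]
    ring

theorem dummyGo_ne_nil (n : Int) (arr : List Int) :
    ∀ (loc : List Int) (cnt : Int) (serial : Bool), dummyGo n arr loc cnt serial ≠ [] := by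
  induction arr with
  | nil => intro loc cnt serial; simp [dummyGo]
  | cons el t ih =>
    intro loc cnt serial
    rw [dummyGo]
    split
    · exact ih _ _ _
    · split
      · exact ih _ _ _
      · split
        · exact ih _ _ _
        · exact ih _ _ _

theorem getD_foldl_insert_add (h k : Int) (g : Int → Int) (a : List Int) :
    ∀ (d : PySem.Dict Int Int),
      (a.foldl (fun d i => d.insert h (d.getD h 0 + g i)) d).getD k 0 =
        d.getD k 0 + (if k = h then (a.map g).sum else 0) := by
  induction a with
  | nil => intro d; simp
  | cons i a ih =>
    intro d
    rw [List.foldl_cons, ih]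
    by_cases hk : k = h
    · subst hk
      simp [PySem.Dict.getD_insert_self]
      ring
    · rw [PySem.Dict.getD_insert_of_ne _ _ _ hk]
      simp [hk]

theorem getD_stepA (H : List Int) (d : PySem.Dict Int Int) (h k : Int) :
    (stepA H d h).getD k 0 =
      d.getD k 0 + (if k = h then sumP (dummy h H) - sumP (dummy (h + 1) H) else 0) := by
  unfold stepA
  have ha := dummyGo_ne_nil h H [] 0 false
  have hb := dummyGo_ne_nil (h + 1) H [] 0 false
  rw [if_neg (by simpa [dummy, List.length_eq_zero_iff] using ha),
      if_neg (by simpa [dummy, List.length_eq_zero_iff] using hb)]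
  have hsub : (fun (d : PySem.Dict Int Int) (j : Int) => d.insert h (d.getD h 0 - partialA j))
      = (fun (d : PySem.Dict Int Int) (j : Int) => d.insert h (d.getD h 0 + (-partialA j))) := by
    funext d j; rw [sub_eq_add_neg]
  rw [hsub, getD_foldl_insert_add h k (fun j => -partialA j),
      getD_foldl_insert_add h k partialA]
  rw [sum_map_neg_partialA]
  split_ifs <;> first
    | (simp [sumP]; ring)
    | simp

theorem set_update_of_subset (s : PySem.Set Int) (l : List Int) (hl : ∀ x ∈ l, x ∈ s) :
    PySem.Set.update s l = s := by
  rw [PySem.Set.update_eq_append_filter]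
  have hfil : (PySem.Set.ofList l).filter (fun y => !(PySem.Set.contains s y)) = [] := by
    rw [List.filter_eq_nil_iff]
    intro x hx
    have hxs : x ∈ s := hl x (by simpa [PySem.Set.mem_ofList] using hx)
    simpa using hxs
  rw [hfil, List.append_nil]

theorem keys_stepA (H : List Int) (d : PySem.Dict Int Int) (h : Int) (hh : h ∈ d.keys) :
    (stepA H d h).keys = d.keys := by
  unfold stepA
  have ha := dummyGo_ne_nil h H [] 0 false
  have hb := dummyGo_ne_nil (h + 1) H [] 0 false
  rw [if_neg (by simpa [dummy, List.length_eq_zero_iff] using ha),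
      if_neg (by simpa [dummy, List.length_eq_zero_iff] using hb)]
  have h1 : ((dummy h H).foldl (fun d i => d.insert h (d.getD h 0 + partialA i)) d).keys
      = d.keys := by
    rw [PySem.Dict.keys_foldl_insert_key]
    apply set_update_of_subset
    intro x hx; simp at hx; simpa [hx] using hh
  rw [PySem.Dict.keys_foldl_insert_key, h1]
  apply set_update_of_subset
  intro x hx; simp at hx; simpa [hx] using hh

theorem foldl_stepA (H : List Int) (hs : List Int) (hnd : hs.Nodup) (k : Int) :
    ∀ (d : PySem.Dict Int Int), (∀ h ∈ hs, h ∈ d.keys) →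
      (hs.foldl (stepA H) d).getD k 0 =
        d.getD k 0 + (if k ∈ hs then sumP (dummy k H) - sumP (dummy (k + 1) H) else 0) := by
  induction hs with
  | nil => intro d _; simp
  | cons h hs ih =>
    intro d hmem
    have hnd' : hs.Nodup := hnd.of_cons
    rw [List.foldl_cons, ih hnd' _ (by
      intro x hx
      rw [keys_stepA H d h (hmem h (by simp))]
      exact hmem x (by simp [hx]))]
    rw [getD_stepA]
    by_cases hk : k = h
    · subst hk
      have : k ∉ hs := by simpa using (List.nodup_cons.mp hnd).1
      simp [this]
    · simp [hk, List.mem_cons]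

theorem keys_foldl_stepA (H : List Int) (hs : List Int) :
    ∀ (d : PySem.Dict Int Int), (∀ h ∈ hs, h ∈ d.keys) →
      (hs.foldl (stepA H) d).keys = d.keys := by
  induction hs with
  | nil => intro d _; rfl
  | cons h hs ih =>
    intro d hmem
    rw [List.foldl_cons, ih _ (by
      intro x hx
      rw [keys_stepA H d h (hmem h (by simp))]
      exact hmem x (by simp [hx])), keys_stepA H d h (hmem h (by simp))]

theorem getD_init (s : List Int) (k : Int) :
    ((s.foldl (fun d x => d.insert x 0) PySem.Dict.empty).getD k 0 : Int) = 0 := by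
  suffices h : ∀ (d : PySem.Dict Int Int), (∀ j, d.getD j 0 = 0) →
      ((s.foldl (fun d x => d.insert x 0) d).getD k 0 : Int) = 0 by
    exact h _ (by intro j; rfl)
  induction s with
  | nil => intro d hd; exact hd k
  | cons x s ih =>
    intro d hd
    rw [List.foldl_cons]
    apply ih
    intro j
    by_cases hj : j = x
    · subst hj; simp [PySem.Dict.getD_insert_self]
    · rw [PySem.Dict.getD_insert_of_ne _ _ _ hj]; exact hd j

theorem keys_init (H : List Int) :
    ((PySem.Set.ofList H).foldl (fun d x => d.insert x 0) (PySem.Dict.empty : PySem.Dict Int Int)).keys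
      = PySem.Set.ofList H := by
  rw [PySem.Dict.keys_foldl_insert]
  show PySem.Set.update [] (PySem.Set.ofList H) = PySem.Set.ofList H
  rw [PySem.Set.update_nil_left,
    PySem.Set.ofList_eq_self_of_nodup _ (PySem.Set.nodup_ofList H)]

theorem solution_eq (H : List Int) :
    solution H = (PySem.List.sorted (PySem.Set.ofList H) (fun x => x) false).map
      (fun k => [k, ((allMins H).count k : Int)]) := by
  simp only [solution]
  set S := PySem.Set.ofList H with hS
  set d0 : PySem.Dict Int Int := List.foldl (fun d x => d.insert x 0) PySem.Dict.empty S with hd0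
  have hkeys0 : d0.keys = S := by rw [hd0, hS]; exact keys_init H
  set hs := PySem.List.sorted d0.keys (fun x => x) true with hhs
  have hmemhs : ∀ x, x ∈ hs ↔ x ∈ S := by
    intro x; rw [hhs, PySem.List.mem_sorted, hkeys0]
  have hndhs : hs.Nodup := by
    have := PySem.List.sorted_perm d0.keys (fun x => x) true
    exact this.nodup_iff.mpr (hkeys0 ▸ PySem.Set.nodup_ofList H)
  set d := hs.foldl (stepA H) d0 with hd
  have hkeys : d.keys = S := by
    rw [hd, keys_foldl_stepA H hs d0 (by intro h hh; rw [hkeys0]; exact (hmemhs h).mp hh), hkeys0]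
  have hget : ∀ k ∈ S, d.getD k 0 = ((allMins H).count k : Int) := by
    intro k hk
    rw [hd, foldl_stepA H hs hndhs k d0
      (by intro h hh; rw [hkeys0]; exact (hmemhs h).mp hh)]
    rw [if_pos ((hmemhs k).mpr hk), getD_init, sumP_dummy, sumP_dummy, countP_sub_count]
    ring
  have hitems : d.items = S.map (fun k => (k, d.getD k 0)) := by
    rw [← hkeys]
    exact PySem.Dict.items_eq_map_keys d (hkeys ▸ PySem.Set.nodup_ofList H) 0
  have hsorted : PySem.List.sorted d.items (fun x => x.1) false
      = (PySem.List.sorted S (fun x => x) false).map (fun k => (k, d.getD k 0)) := by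
    apply PySem.List.sorted_eq_of_perm_of_pairwise_lt
    · rw [hitems]
      exact (PySem.List.sorted_perm S (fun x => x) false).map _
    · have hp : (PySem.List.sorted S (fun x => x) false).Pairwise (· < ·) := by
        rw [hS]; exact PySem.List.sorted_ofList_pairwise_lt H
      exact hp.map _ (by intro a b hab; simpa using hab)
  rw [hsorted, List.map_map]
  apply List.map_congr_left
  intro k hk
  have hkS : k ∈ S := by
    rw [PySem.List.mem_sorted] at hk
    exact hk
  simp [hget k hkS]

theorem solution_alt_eq (H : List Int) :
    solution_alt H = (PySem.List.sorted (PySem.Set.ofList H) (fun x => x) false).map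
      (fun k => [k, ((allMins H).count k : Int)]) := by
  simp only [solution_alt]
  have hcnt : (allMins H).foldl (fun d x => d.insert x (d.getD x 0 + 1)) PySem.Dict.empty
      = PySem.Dict.counter (allMins H) :=
    PySem.Dict.foldl_insert_getD_add_one_eq_counter (allMins H)
  rw [hcnt, PySem.Dict.keys_counter]
  have hsorted : PySem.List.sorted (PySem.Set.ofList (allMins H)) (fun x => x) false
      = PySem.List.sorted (PySem.Set.ofList H) (fun x => x) false := by
    apply PySem.List.sorted_eq_sorted_of_perm _ _ _ (fun a b h => h)
    refine (List.perm_ext_iff_of_nodup (PySem.Set.nodup_ofList _) (PySem.Set.nodup_ofList _)).mpr ?_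
    intro a
    rw [PySem.Set.mem_ofList, PySem.Set.mem_ofList, mem_allMins]
  rw [hsorted]
  apply List.map_congr_left
  intro k hk
  rw [PySem.Dict.getD_counter]

-- ===== VERDICT (by name: the statement is the Claim_ definition above) =====
theorem solution_spec : Claim_equal_solution := by
  intro H _
  unfold Spec_solution
  rw [solution_eq, solution_alt_eq]
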